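-- pv_equiv track=rewrite | github.com/byoeval/BYO-EVAL | evaluation_pipeline/question_handler.py | add_preprompt
-- ===== SOURCE A (Python) =====
-- preprompts = {
--     "chess":{
--         "debiased": "This is not a real chess game. The number of each piece and their position can vary arbitrary. Just focus on answering the following question based on the visual content.",
--         "cot": "First, think carefully, step by step, about the question being asked and the relevant elements of the image to which the question refers. End you message with {answer : <answer>}",
--         "debiased_cot": "This is not a real chess game. The number of each piece and their position can vary arbitrary. Just focus on answering the following question based on the visual content. First, think carefully, step by step, about the question being asked and the relevant elements of the image to which the question refers. End you message with {answer : <answer>}",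
-- },
--     "poker":{
--         "debiased":"This is not a real poker chess game. The number of each card and their position can vary arbitrary. Just focus on answering the following question based on the visual content. ",
--         "cot":"First, think carefully, step by step, about the question being asked and the relevant elements of the image to which the question refers. End you message with {answer : <answer>}",
--         "debiased_cot": "This is not a real poker chess game. The number of each card and their position can vary arbitrary. Just focus on answering the following question based on the visual content. First, think carefully, step by step, about the question being asked and the relevant elements of the image to which the question refers. End you message with {answer : <answer>}",
--     }
-- }
--
-- def add_preprompt(questions: list[str], game: str, preprompt_types: list[str]) -> list[str]:
--     """
--     Adds preprompts to a list of questions based on the game and preprompt types.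
--
--     Args:
--         questions: List of questions to add preprompts to.
--         game: The game context for the questions ('chess' or 'poker').
--         preprompt_types: List of preprompt types to add. Can include 'debiased',
--                         'cot', 'debiased_cot', '' (empty string), or a custom prompt.
--
--     Returns:
--         A list of questions with preprompts added.
--     """
--     result = []
--
--     for question in questions:
--         modified_question = question
--
--         for preprompt_type in preprompt_types:
--             # Skip if preprompt_type is empty
--             if not preprompt_type:
--                 continue
--
--             # Check if preprompt_type is a standard type
--             if preprompt_type in ["debiased", "cot", "debiased_cot"]:
--                 # Get the preprompt from the preprompts dictionary
--                 if game in preprompts and preprompt_type in preprompts[game]: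
--                     preprompt = preprompts[game][preprompt_type]
--                     modified_question = f"{preprompt} {modified_question}"
--             else:
--                 # If it's a custom preprompt, add it directly
--                 modified_question = f"{preprompt_type} {modified_question}"
--
--         result.append(modified_question)
--
--     return result
-- ===== SOURCE B (Python) =====
-- preprompts = {
--     "chess":{
--         "debiased": "This is not a real chess game. The number of each piece and their position can vary arbitrary. Just focus on answering the following question based on the visual content.",
--         "cot": "First, think carefully, step by step, about the question being asked and the relevant elements of the image to which the question refers. End you message with {answer : <answer>}",
--         "debiased_cot": "This is not a real chess game. The number of each piece and their position can vary arbitrary. Just focus on answering the following question based on the visual content. First, think carefully, step by step, about the question being asked and the relevant elements of the image to which the question refers. End you message with {answer : <answer>}",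
-- },
--     "poker":{
--         "debiased":"This is not a real poker chess game. The number of each card and their position can vary arbitrary. Just focus on answering the following question based on the visual content. ",
--         "cot":"First, think carefully, step by step, about the question being asked and the relevant elements of the image to which the question refers. End you message with {answer : <answer>}",
--         "debiased_cot": "This is not a real poker chess game. The number of each card and their position can vary arbitrary. Just focus on answering the following question based on the visual content. First, think carefully, step by step, about the question being asked and the relevant elements of the image to which the question refers. End you message with {answer : <answer>}",
--     }
-- }
--
--
-- def _resolve(preprompt_type, game):
--     """Return the preprompt text for one entry, or None if it contributes nothing."""
--     if not preprompt_type: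
--         return None
--     if preprompt_type in ("debiased", "cot", "debiased_cot"):
--         table = preprompts.get(game)
--         if table is not None and preprompt_type in table:
--             return table[preprompt_type]
--         return None
--     return preprompt_type
--
--
-- def add_preprompt(questions: list[str], game: str, preprompt_types: list[str]) -> list[str]:
--     # Hoist the question-independent work: build the shared prefix once,
--     # then prepend it to every question in a single map.
--     prefix = ""
--     for preprompt_type in preprompt_types:
--         piece = _resolve(preprompt_type, game)
--         if piece is not None:
--             prefix = piece + " " + prefix
--     return [prefix + question for question in questions]
-- ===== Notes on version B (the rewrite author's own statement) =====
-- stated objective: faster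
-- what changed: B hoists the question-independent inner loop: it resolves preprompt_types once into a single shared prefix string and then prepends that prefix to each question in one map, instead of re-resolving every preprompt type for every question as A's nested loops do.
import Mathlib
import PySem

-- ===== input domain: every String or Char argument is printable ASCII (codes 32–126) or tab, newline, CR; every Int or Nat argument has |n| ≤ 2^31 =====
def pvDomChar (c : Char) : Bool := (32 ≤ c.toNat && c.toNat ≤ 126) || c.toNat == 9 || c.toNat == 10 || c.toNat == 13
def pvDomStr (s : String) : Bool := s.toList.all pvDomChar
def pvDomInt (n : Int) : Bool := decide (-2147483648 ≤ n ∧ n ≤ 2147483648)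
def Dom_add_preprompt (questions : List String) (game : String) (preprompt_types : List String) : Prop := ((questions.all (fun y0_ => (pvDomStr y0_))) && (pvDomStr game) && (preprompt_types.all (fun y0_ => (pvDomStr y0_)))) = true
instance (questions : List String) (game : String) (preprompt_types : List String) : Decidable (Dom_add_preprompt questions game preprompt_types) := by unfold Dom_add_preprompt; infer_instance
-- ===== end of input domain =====

-- B hoists the question-independent inner loop into one shared pref computed once,
-- then prepends it to every question in a single map (faster: O(q+t) vs A's O(q*t)).

-- ===== PORT A =====
-- module-level constant `preprompts`
def pvPreprompts : PySem.Dict String (PySem.Dict String String) :=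
  PySem.Dict.ofList
    [("chess", PySem.Dict.ofList
        [("debiased", "This is not a real chess game. The number of each piece and their position can vary arbitrary. Just focus on answering the following question based on the visual content."),
         ("cot", "First, think carefully, step by step, about the question being asked and the relevant elements of the image to which the question refers. End you message with {answer : <answer>}"),
         ("debiased_cot", "This is not a real chess game. The number of each piece and their position can vary arbitrary. Just focus on answering the following question based on the visual content. First, think carefully, step by step, about the question being asked and the relevant elements of the image to which the question refers. End you message with {answer : <answer>}")]),
     ("poker", PySem.Dict.ofList
        [("debiased", "This is not a real poker chess game. The number of each card and their position can vary arbitrary. Just focus on answering the following question based on the visual content. "),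
         ("cot", "First, think carefully, step by step, about the question being asked and the relevant elements of the image to which the question refers. End you message with {answer : <answer>}"),
         ("debiased_cot", "This is not a real poker chess game. The number of each card and their position can vary arbitrary. Just focus on answering the following question based on the visual content. First, think carefully, step by step, about the question being asked and the relevant elements of the image to which the question refers. End you message with {answer : <answer>}")])]

-- the body of A's inner `for preprompt_type in preprompt_types` loop
def pvStepA (game : String) (modified_question preprompt_type : String) : String :=
  if preprompt_type = "" then modified_question
  else if preprompt_type ∈ ["debiased", "cot", "debiased_cot"] then
    match pvPreprompts.get? game with
    | some d =>
      match d.get? preprompt_type with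
      | some preprompt => preprompt ++ " " ++ modified_question
      | none => modified_question
    | none => modified_question
  else preprompt_type ++ " " ++ modified_question

def add_preprompt (questions : List String) (game : String) (preprompt_types : List String) : List String :=
  questions.foldl
    (fun result question =>
      result ++ [preprompt_types.foldl (pvStepA game) question])
    []

-- ===== PORT B =====
-- `_resolve(preprompt_type, game)` from Source B
def pvResolve (preprompt_type game : String) : Option String :=
  if preprompt_type = "" then none
  else if preprompt_type ∈ ["debiased", "cot", "debiased_cot"] then
    match pvPreprompts.get? game with
    | some table =>
      match table.get? preprompt_type with
      | some p => some p
      | none => none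
    | none => none
  else some preprompt_type

def add_preprompt_alt (questions : List String) (game : String) (preprompt_types : List String) : List String :=
  let pref := preprompt_types.foldl
    (fun pref preprompt_type =>
      match pvResolve preprompt_type game with
      | some piece => piece ++ " " ++ pref
      | none => pref) ""
  questions.map (fun question => pref ++ question)

-- ===== PRECONDITION & SPEC =====
def Spec_add_preprompt (questions : List String) (game : String) (preprompt_types : List String) (out : List String) : Prop := out = add_preprompt_alt questions game preprompt_types
instance (questions : List String) (game : String) (preprompt_types : List String) (out : List String) : Decidable (Spec_add_preprompt questions game preprompt_types out) := by unfold Spec_add_preprompt; infer_instance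

-- ===== CLAIM (what is proved, stated in full; the proofs are below) =====
def Claim_equal_add_preprompt : Prop := ∀ (questions : List String) (game : String) (preprompt_types : List String), Dom_add_preprompt questions game preprompt_types → Spec_add_preprompt questions game preprompt_types (add_preprompt questions game preprompt_types)

-- ===== LEMMAS AND PROOFS =====

-- the string one preprompt type contributes (with its trailing space), or ""
def pvPiece (game preprompt_type : String) : String :=
  match pvResolve preprompt_type game with
  | some p => p ++ " "
  | none => ""

theorem pvStepA_eq (game m t : String) :
    pvStepA game m t = pvPiece game t ++ m := by
  unfold pvStepA pvPiece pvResolve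
  split_ifs with h1 h2
  · simp
  · cases pvPreprompts.get? game with
    | none => simp
    | some d =>
      cases hd : d.get? t with
      | none => simp [hd]
      | some p => simp [hd, String.append_assoc]
  · simp [String.append_assoc]

theorem pvStepB_eq (game pref t : String) :
    (match pvResolve t game with
     | some piece => piece ++ " " ++ pref
     | none => pref) = pvPiece game t ++ pref := by
  unfold pvPiece
  cases pvResolve t game with
  | none => simp
  | some p => simp [String.append_assoc]

theorem pv_fold_shift (game : String) (ts : List String) :
    ∀ (a q : String),
      ts.foldl (fun m t => pvPiece game t ++ m) (a ++ q)
        = ts.foldl (fun m t => pvPiece game t ++ m) a ++ q := by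
  induction ts with
  | nil => intro a q; simp
  | cons t ts ih =>
    intro a q
    simp only [List.foldl_cons]
    rw [← String.append_assoc, ih]

theorem pv_inner_eq (game : String) (ts : List String) (q : String) :
    ts.foldl (pvStepA game) q
      = ts.foldl (fun m t => pvPiece game t ++ m) "" ++ q := by
  have h : ts.foldl (pvStepA game) q = ts.foldl (fun m t => pvPiece game t ++ m) q := by
    induction ts generalizing q with
    | nil => rfl
    | cons t ts ih => simp only [List.foldl_cons, pvStepA_eq, ih]
  rw [h]
  have := pv_fold_shift game ts "" q
  simpa using this

theorem pv_foldl_append_map (f : String → String) (qs : List String) :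
    ∀ (acc : List String),
      qs.foldl (fun result q => result ++ [f q]) acc = acc ++ qs.map f := by
  induction qs with
  | nil => intro acc; simp
  | cons q qs ih => intro acc; simp [ih]

-- ===== VERDICT (by name: the statement is the Claim_ definition above) =====
theorem add_preprompt_spec : Claim_equal_add_preprompt := by
  intro questions game preprompt_types _
  unfold Spec_add_preprompt add_preprompt add_preprompt_alt
  rw [pv_foldl_append_map]
  simp only [List.nil_append]
  have hfold : preprompt_types.foldl
      (fun pref t =>
        match pvResolve t game with
        | some piece => piece ++ " " ++ pref
        | none => pref) ""
      = preprompt_types.foldl (fun m t => pvPiece game t ++ m) "" := by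
    induction preprompt_types generalizing game with
    | nil => rfl
    | cons t ts ih => simp only [List.foldl_cons, pvStepB_eq]
  rw [hfold]
  apply List.map_congr_left
  intro q _
  exact pv_inner_eq game preprompt_types q
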